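-- pv_equiv track=rewrite | github.com/hyj1116/LeetCode-HYJ | 1-Easy/5392. Maximum Score After Splitting a String/5392. Maximum Score After Splitting a String.py | maxScore
-- ===== SOURCE A (Python) =====
-- from collections import Counter
--
-- def maxScore(s: str) -> int:
--     res = 0
--     for i in range(1, len(s)):
--         left_counter = Counter(s[:i])
--         left = left_counter['0']
--         right_counter = Counter(s[i:])
--         right = right_counter['1']
--         res = max(res, left+right)
--     return res
-- ===== SOURCE B (Python) =====
-- def maxScore(s: str) -> int:
--     total_ones = 0
--     for c in s:
--         if c == '1':
--             total_ones += 1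
--     best = 0
--     zeros = 0
--     ones = 0
--     for c in s[:-1]:
--         if c == '0':
--             zeros += 1
--         elif c == '1':
--             ones += 1
--         best = max(best, zeros + total_ones - ones)
--     return best
-- ===== Notes on version B (the rewrite author's own statement) =====
-- stated objective: faster
-- what changed: Replaced the loop that rebuilds two Counters over both halves at every split point with a single left-to-right pass maintaining running zero/one counts against a precomputed total of ones.
import Mathlib
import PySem

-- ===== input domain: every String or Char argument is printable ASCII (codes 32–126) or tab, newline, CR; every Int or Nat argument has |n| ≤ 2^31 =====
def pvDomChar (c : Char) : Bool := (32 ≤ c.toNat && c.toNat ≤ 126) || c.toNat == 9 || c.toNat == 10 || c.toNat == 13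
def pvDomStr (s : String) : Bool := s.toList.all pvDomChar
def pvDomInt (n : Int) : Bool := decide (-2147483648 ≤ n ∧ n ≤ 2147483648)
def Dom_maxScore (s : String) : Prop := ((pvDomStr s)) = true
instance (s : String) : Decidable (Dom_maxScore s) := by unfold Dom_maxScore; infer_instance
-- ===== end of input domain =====

-- B replaces A's per-split Counter rebuilds by one pass with running zero/one counts (objective: faster).

-- ===== PORT A =====
def maxScore (s : String) : Int :=
  (PySem.List.pyRange 1 (PySem.Str.len s) 1).foldl
    (fun res i =>
      let leftCounter := PySem.Dict.counter (PySem.Str.slice s none (some i)).toList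
      let left := leftCounter.getD '0' 0
      let rightCounter := PySem.Dict.counter (PySem.Str.slice s (some i) none).toList
      let right := rightCounter.getD '1' 0
      max res (left + right)) 0

-- ===== PORT B =====
def maxScore_alt (s : String) : Int :=
  let totalOnes : Int := s.toList.foldl (fun acc c => if c == '1' then acc + 1 else acc) 0
  let r := (PySem.Str.slice s none (some (-1))).toList.foldl
    (fun (acc : Int × Int × Int) c =>
      let zo := if c == '0' then (acc.2.1 + 1, acc.2.2)
                else if c == '1' then (acc.2.1, acc.2.2 + 1)
                else (acc.2.1, acc.2.2)
      (max acc.1 (zo.1 + totalOnes - zo.2), zo.1, zo.2))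
    (0, 0, 0)
  r.1

-- ===== PRECONDITION & SPEC =====
def Spec_maxScore (s : String) (out : Int) : Prop := out = maxScore_alt s
instance (s : String) (out : Int) : Decidable (Spec_maxScore s out) := by unfold Spec_maxScore; infer_instance

-- ===== CLAIM (what is proved, stated in full; the proofs are below) =====
def Claim_equal_maxScore : Prop := ∀ (s : String), Dom_maxScore s → Spec_maxScore s (maxScore s)

-- ===== LEMMAS AND PROOFS =====

-- reference: max over splits, as a fold over List.range
def pvBest (l : List Char) (m : Nat) : Int :=
  (List.range m).foldl
    (fun r j => max r (((l.take (j+1)).count '0' : Int) + ((l.drop (j+1)).count '1' : Int))) 0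

lemma pv_take_count_split (l : List Char) (j : Nat) :
    ((l.drop j).count '1' : Int) = (l.count '1' : Int) - ((l.take j).count '1' : Int) := by
  have h := congrArg (List.count '1') (List.take_append_drop j l)
  rw [List.count_append] at h
  push_cast [← h]; ring

lemma pv_loop_inv (l : List Char) (k : Nat) (hk : k ≤ l.length) :
    (l.take k).foldl
      (fun (acc : Int × Int × Int) c =>
        let zo := if c == '0' then (acc.2.1 + 1, acc.2.2)
                  else if c == '1' then (acc.2.1, acc.2.2 + 1)
                  else (acc.2.1, acc.2.2)
        (max acc.1 (zo.1 + (l.count '1' : Int) - zo.2), zo.1, zo.2))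
      (0, 0, 0)
    = (pvBest l k, ((l.take k).count '0' : Int), ((l.take k).count '1' : Int)) := by
  induction k with
  | zero => simp [pvBest]
  | succ k ih =>
    have hk' : k < l.length := hk
    rw [← List.take_concat_get hk', List.concat_eq_append, List.foldl_append, List.foldl_cons, List.foldl_nil, ih (Nat.le_of_lt hk')]
    have hcc : l.take (k+1) = l.take k ++ [l[k]] := by
      rw [← List.take_concat_get hk', List.concat_eq_append]
    have h0 : ((l.take (k+1)).count '0' : Int)
        = ((l.take k).count '0' : Int) + (if l[k] == '0' then 1 else 0) := by
      rw [hcc, List.count_append]; by_cases h : l[k] = '0' <;> simp [h]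
    have h1 : ((l.take (k+1)).count '1' : Int)
        = ((l.take k).count '1' : Int) + (if l[k] == '1' then 1 else 0) := by
      rw [hcc, List.count_append]; by_cases h : l[k] = '1' <;> simp [h]
    have h0' : (((l.take k ++ [l[k]]).count '0' : Int)) = ((l.take (k+1)).count '0' : Int) := by
      rw [hcc]
    have h1' : (((l.take k ++ [l[k]]).count '1' : Int)) = ((l.take (k+1)).count '1' : Int) := by
      rw [hcc]
    have hB : pvBest l (k+1) = max (pvBest l k)
        (((l.take (k+1)).count '0' : Int) + ((l.drop (k+1)).count '1' : Int)) := by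
      rw [pvBest, pvBest, List.range_succ, List.foldl_append, List.foldl_cons, List.foldl_nil]
    rw [hB, pv_take_count_split l (k+1)]
    by_cases hc0 : l[k] = '0'
    · have e0 : (l[k] == '0') = true := by simp [hc0]
      have e1 : (l[k] == '1') = false := by simp [hc0]
      simp only [e0, e1, if_true, Bool.false_eq_true, if_false] at h0 h1
      refine Prod.ext ?_ (Prod.ext ?_ ?_)
      · simp only [e0, if_true]
        congr 1
        omega
      · simp only [e0, if_true]
        omega
      · simp only [e0, e1, if_true, Bool.false_eq_true, if_false]
        omega
    · by_cases hc1 : l[k] = '1'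
      · have e0 : (l[k] == '0') = false := by simp [hc0]
        have e1 : (l[k] == '1') = true := by simp [hc1]
        simp only [e0, e1, if_true, Bool.false_eq_true, if_false] at h0 h1
        refine Prod.ext ?_ (Prod.ext ?_ ?_)
        · simp only [e0, e1, if_true, Bool.false_eq_true, if_false]
          congr 1
          omega
        · simp only [e0, e1, if_true, Bool.false_eq_true, if_false]
          omega
        · simp only [e0, e1, if_true, Bool.false_eq_true, if_false]
          omega
      · have e0 : (l[k] == '0') = false := by simp [hc0]
        have e1 : (l[k] == '1') = false := by simp [hc1]
        simp only [e0, e1, Bool.false_eq_true, if_false] at h0 h1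
        refine Prod.ext ?_ (Prod.ext ?_ ?_)
        · simp only [e0, e1, Bool.false_eq_true, if_false]
          congr 1
          omega
        · simp only [e0, e1, Bool.false_eq_true, if_false]
          omega
        · simp only [e0, e1, Bool.false_eq_true, if_false]
          omega

lemma pv_A_eq (s : String) : maxScore s = pvBest s.toList (s.toList.length - 1) := by
  unfold maxScore pvBest
  rw [PySem.Str.len_eq, PySem.List.pyRange_one, List.foldl_map]
  have hn : ((s.toList.length : Int) - 1).toNat = s.toList.length - 1 := by omega
  rw [hn]
  apply PySem.List.foldl_congr_mem
  intro res k _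
  have hpos : (0:Int) ≤ 1 + (k:Int) := by omega
  have ht : ((1:Int) + (k:Int)).toNat = k + 1 := by omega
  have hcast : (1 : Int) + (k : Int) = ((k+1 : Nat) : Int) := by push_cast; ring
  simp only [PySem.Str.slice, hcast]
  have hp : (0:Int) ≤ (k:Int) + 1 := by omega
  have hq : ((k:Int) + 1).toNat = k + 1 := by omega
  simp [PySem.Chars.slice, PySem.Dict.getD_counter, PySem.List.slice_to _ hp,
    PySem.List.slice_from _ hp, hq]

lemma pv_B_eq (s : String) : maxScore_alt s = pvBest s.toList (s.toList.length - 1) := by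
  unfold maxScore_alt
  rw [PySem.List.foldl_beq_add_one]
  simp only [PySem.Str.slice_to_neg_one, List.dropLast_eq_take, zero_add]
  rw [pv_loop_inv s.toList (s.toList.length - 1) (Nat.sub_le _ _)]

-- ===== VERDICT (by name: the statement is the Claim_ definition above) =====
theorem maxScore_spec : Claim_equal_maxScore := by
  intro s _
  unfold Spec_maxScore
  rw [pv_A_eq, pv_B_eq]
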